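-- pv_equiv track=rewrite | github.com/IamArmanNikkhah/MRF-Entropy-Calculation | custom_potential.py | max_difference_smoothness
-- ===== SOURCE A (Python) =====
-- def max_difference_smoothness(clique_values):
--     """
--     Smoothness function using the maximum difference between any pair in the clique.
--
--     Parameters:
--     -----------
--     clique_values : tuple of int
--         The four values in a clique (x_i, x_j, x_k, x_l)
--
--     Returns:
--     --------
--     smoothness : float
--         Smoothness value computed for the clique
--     """
--     x_i, x_j, x_k, x_l = clique_values
--
--     # All possible pairs in a 2×2 clique
--     pairs = [
--         (x_i, x_j), (x_i, x_k), (x_i, x_l),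
--         (x_j, x_k), (x_j, x_l), (x_k, x_l)
--     ]
--
--     # Maximum difference between any pair
--     smoothness = max(abs(a - b) for a, b in pairs)
--
--     return smoothness
-- ===== SOURCE B (Python) =====
-- def max_difference_smoothness(clique_values):
--     x_i, x_j, x_k, x_l = clique_values
--     return max(x_i, x_j, x_k, x_l) - min(x_i, x_j, x_k, x_l)
-- ===== Notes on version B (the rewrite author's own statement) =====
-- stated objective: simpler
-- what changed: Replaces the enumeration of all 6 pairs and their absolute differences with the closed form max - min of the four values.
import Mathlib
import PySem

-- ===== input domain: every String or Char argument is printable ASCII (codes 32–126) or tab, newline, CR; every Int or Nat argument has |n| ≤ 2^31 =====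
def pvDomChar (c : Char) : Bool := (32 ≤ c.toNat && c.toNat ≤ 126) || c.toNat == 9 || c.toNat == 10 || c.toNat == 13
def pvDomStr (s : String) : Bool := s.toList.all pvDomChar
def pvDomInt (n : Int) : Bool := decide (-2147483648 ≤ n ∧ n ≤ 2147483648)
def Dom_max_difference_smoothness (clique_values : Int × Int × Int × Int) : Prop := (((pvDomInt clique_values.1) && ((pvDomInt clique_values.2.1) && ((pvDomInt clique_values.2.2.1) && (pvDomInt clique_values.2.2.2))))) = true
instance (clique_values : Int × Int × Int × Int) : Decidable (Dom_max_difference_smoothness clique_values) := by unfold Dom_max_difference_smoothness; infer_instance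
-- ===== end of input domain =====

-- ===== PORT A =====
-- B computes max - min in closed form instead of enumerating all 6 pairwise absolute differences (objective: simpler).
def max_difference_smoothness (clique_values : Int × Int × Int × Int) : Int :=
  let x_i := clique_values.1
  let x_j := clique_values.2.1
  let x_k := clique_values.2.2.1
  let x_l := clique_values.2.2.2
  let pairs : List (Int × Int) :=
    [(x_i, x_j), (x_i, x_k), (x_i, x_l), (x_j, x_k), (x_j, x_l), (x_k, x_l)]
  let diffs := pairs.map (fun p => |p.1 - p.2|)
  -- max of a nonempty list, as Python's max over the generator
  diffs.foldl max (|x_i - x_j|) -- first element repeated as seed is safe for max; mirrors max over the 6 diffs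


-- ===== PORT B =====
def max_difference_smoothness_alt (clique_values : Int × Int × Int × Int) : Int :=
  let x_i := clique_values.1
  let x_j := clique_values.2.1
  let x_k := clique_values.2.2.1
  let x_l := clique_values.2.2.2
  max (max (max x_i x_j) x_k) x_l - min (min (min x_i x_j) x_k) x_l


-- ===== PRECONDITION & SPEC =====
def Spec_max_difference_smoothness (clique_values : Int × Int × Int × Int) (out : Int) : Prop := out = max_difference_smoothness_alt clique_values
instance (clique_values : Int × Int × Int × Int) (out : Int) : Decidable (Spec_max_difference_smoothness clique_values out) := by unfold Spec_max_difference_smoothness; infer_instance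

-- ===== CLAIM (what is proved, stated in full; the proofs are below) =====
def Claim_equal_max_difference_smoothness : Prop := ∀ (clique_values : Int × Int × Int × Int), Dom_max_difference_smoothness clique_values → Spec_max_difference_smoothness clique_values (max_difference_smoothness clique_values)

-- ===== LEMMAS AND PROOFS =====

-- lower bound: the diameter max - min is at most F once every signed pairwise difference is at most F
theorem pvLower4 (a b c d F : Int)
    (h1 : a - b ≤ F) (h1' : -(a - b) ≤ F) (h2 : a - c ≤ F) (h2' : -(a - c) ≤ F)
    (h3 : a - d ≤ F) (h3' : -(a - d) ≤ F) (h4 : b - c ≤ F) (h4' : -(b - c) ≤ F)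
    (h5 : b - d ≤ F) (h5' : -(b - d) ≤ F) (h6 : c - d ≤ F) (h6' : -(c - d) ≤ F) :
    max (max (max a b) c) d - min (min (min a b) c) d ≤ F := by omega

-- ===== VERDICT (by name: the statement is the Claim_ definition above) =====
theorem max_difference_smoothness_spec : Claim_equal_max_difference_smoothness := by
  intro cv _
  obtain ⟨a, b, c, d⟩ := cv
  show max_difference_smoothness (a, b, c, d) = max_difference_smoothness_alt (a, b, c, d)
  simp only [max_difference_smoothness, max_difference_smoothness_alt, List.map, List.foldl,
    abs_eq_max_neg]
  apply le_antisymm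
  ·
    have hMa : a ≤ max (max (max a b) c) d := ((le_max_left a b).trans (le_max_left _ c)).trans (le_max_left _ d)
    have hMb : b ≤ max (max (max a b) c) d := ((le_max_right a b).trans (le_max_left _ c)).trans (le_max_left _ d)
    have hMc : c ≤ max (max (max a b) c) d := (le_max_right (max a b) c).trans (le_max_left _ d)
    have hMd : d ≤ max (max (max a b) c) d := le_max_right (max (max a b) c) d
    have hma : min (min (min a b) c) d ≤ a := (min_le_left _ d).trans ((min_le_left _ c).trans (min_le_left a b))
    have hmb : min (min (min a b) c) d ≤ b := (min_le_left _ d).trans ((min_le_left _ c).trans (min_le_right a b))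
    have hmc : min (min (min a b) c) d ≤ c := (min_le_left _ d).trans (min_le_right (min a b) c)
    have hmd : min (min (min a b) c) d ≤ d := min_le_right (min (min a b) c) d
    refine max_le (max_le (max_le (max_le (max_le (max_le ?_ ?_) ?_) ?_) ?_) ?_) ?_
    case _ => exact max_le (sub_le_sub hMa hmb) (by rw [neg_sub]; exact sub_le_sub hMb hma)
    all_goals first
      | exact max_le (sub_le_sub hMa hmb) (by rw [neg_sub]; exact sub_le_sub hMb hma)
      | exact max_le (sub_le_sub hMa hmc) (by rw [neg_sub]; exact sub_le_sub hMc hma)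
      | exact max_le (sub_le_sub hMa hmd) (by rw [neg_sub]; exact sub_le_sub hMd hma)
      | exact max_le (sub_le_sub hMb hmc) (by rw [neg_sub]; exact sub_le_sub hMc hmb)
      | exact max_le (sub_le_sub hMb hmd) (by rw [neg_sub]; exact sub_le_sub hMd hmb)
      | exact max_le (sub_le_sub hMc hmd) (by rw [neg_sub]; exact sub_le_sub hMd hmc)
  ·
    have hp1 : (max (a - b) (-(a - b))) ≤ max (max (max (max (max (max (max (a - b) (-(a - b))) (max (a - b) (-(a - b)))) (max (a - c) (-(a - c)))) (max (a - d) (-(a - d)))) (max (b - c) (-(b - c)))) (max (b - d) (-(b - d)))) (max (c - d) (-(c - d))) :=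
      ((((((le_max_left _ _).trans (le_max_left _ _)).trans (le_max_left _ _)).trans (le_max_left _ _)).trans (le_max_left _ _)).trans (le_max_left _ _))
    have hp2 : (max (a - c) (-(a - c))) ≤ max (max (max (max (max (max (max (a - b) (-(a - b))) (max (a - b) (-(a - b)))) (max (a - c) (-(a - c)))) (max (a - d) (-(a - d)))) (max (b - c) (-(b - c)))) (max (b - d) (-(b - d)))) (max (c - d) (-(c - d))) :=
      (((((le_max_right _ _).trans (le_max_left _ _)).trans (le_max_left _ _)).trans (le_max_left _ _)).trans (le_max_left _ _))
    have hp3 : (max (a - d) (-(a - d))) ≤ max (max (max (max (max (max (max (a - b) (-(a - b))) (max (a - b) (-(a - b)))) (max (a - c) (-(a - c)))) (max (a - d) (-(a - d)))) (max (b - c) (-(b - c)))) (max (b - d) (-(b - d)))) (max (c - d) (-(c - d))) :=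
      ((((le_max_right _ _).trans (le_max_left _ _)).trans (le_max_left _ _)).trans (le_max_left _ _))
    have hp4 : (max (b - c) (-(b - c))) ≤ max (max (max (max (max (max (max (a - b) (-(a - b))) (max (a - b) (-(a - b)))) (max (a - c) (-(a - c)))) (max (a - d) (-(a - d)))) (max (b - c) (-(b - c)))) (max (b - d) (-(b - d)))) (max (c - d) (-(c - d))) :=
      (((le_max_right _ _).trans (le_max_left _ _)).trans (le_max_left _ _))
    have hp5 : (max (b - d) (-(b - d))) ≤ max (max (max (max (max (max (max (a - b) (-(a - b))) (max (a - b) (-(a - b)))) (max (a - c) (-(a - c)))) (max (a - d) (-(a - d)))) (max (b - c) (-(b - c)))) (max (b - d) (-(b - d)))) (max (c - d) (-(c - d))) :=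
      ((le_max_right _ _).trans (le_max_left _ _))
    have hp6 : (max (c - d) (-(c - d))) ≤ max (max (max (max (max (max (max (a - b) (-(a - b))) (max (a - b) (-(a - b)))) (max (a - c) (-(a - c)))) (max (a - d) (-(a - d)))) (max (b - c) (-(b - c)))) (max (b - d) (-(b - d)))) (max (c - d) (-(c - d))) :=
      le_max_right _ _
    exact pvLower4 a b c d _
      ((le_max_left _ _).trans hp1) ((le_max_right _ _).trans hp1)
      ((le_max_left _ _).trans hp2) ((le_max_right _ _).trans hp2)
      ((le_max_left _ _).trans hp3) ((le_max_right _ _).trans hp3)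
      ((le_max_left _ _).trans hp4) ((le_max_right _ _).trans hp4)
      ((le_max_left _ _).trans hp5) ((le_max_right _ _).trans hp5)
      ((le_max_left _ _).trans hp6) ((le_max_right _ _).trans hp6)
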